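-- pv_equiv track=rewrite | github.com/SpykeX3/NSUPython2021 | problems-4/v-chernikov/problem2.py | create_translation_table
-- ===== SOURCE A (Python) =====
-- def create_translation_table(t_from, t_to):
--     if len(t_from) != len(t_to):
--         raise ValueError("'from' length doesn't match 'to'")
--     result = {}
--     for i, symbol in enumerate(t_from):
--         if symbol in result:
--             raise ValueError("invalid 'from', trying to map symbol multiple times")
--         result[symbol] = t_to[i]
--     return result
-- ===== SOURCE B (Python) =====
-- def create_translation_table(t_from, t_to):
--     if len(t_from) != len(t_to):
--         raise ValueError("'from' length doesn't match 'to'")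
--     keys = sorted(t_from)
--     for a, b in zip(keys, keys[1:]):
--         if a == b:
--             raise ValueError("invalid 'from', trying to map symbol multiple times")
--     return {k: v for k, v in zip(t_from, t_to)}
-- ===== Notes on version B (the rewrite author's own statement) =====
-- stated objective: alternative
-- what changed: Duplicate symbols are detected up front by sorting t_from and scanning adjacent pairs (sort-then-scan) instead of A's incremental membership test during the build; the mapping itself is then built in one shot from zip.
import Mathlib
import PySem

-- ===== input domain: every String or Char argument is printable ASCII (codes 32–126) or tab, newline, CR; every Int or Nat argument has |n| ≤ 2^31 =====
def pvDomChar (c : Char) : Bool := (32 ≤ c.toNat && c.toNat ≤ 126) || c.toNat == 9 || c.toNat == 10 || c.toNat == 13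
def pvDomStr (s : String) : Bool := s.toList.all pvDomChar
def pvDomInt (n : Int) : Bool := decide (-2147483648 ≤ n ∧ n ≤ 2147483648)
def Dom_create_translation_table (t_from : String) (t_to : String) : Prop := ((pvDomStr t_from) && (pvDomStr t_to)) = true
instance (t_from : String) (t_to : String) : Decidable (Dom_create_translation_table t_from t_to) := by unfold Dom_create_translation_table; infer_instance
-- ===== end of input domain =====

-- B detects duplicate symbols up front by sorting t_from and scanning adjacent pairs,
-- then builds the whole mapping in one shot from zip, instead of A's incremental loop
-- with a membership test before each insertion. Equivalence of the RETURN value is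
-- claimed on Pre_ (equal lengths, no duplicate symbols), exactly the inputs where the
-- Python A returns instead of raising ValueError.

-- ===== PORT A =====
-- loop 'for i, symbol in enumerate(t_from): ...'; the two 'raise ValueError' branches
-- return the current state — those inputs are excluded by Pre_.
def cttLoopA (tt : String) (pairs : List (Int × Char)) (acc : PySem.Dict String String) :
    PySem.Dict String String :=
  match pairs with
  | [] => acc
  | (i, symbol) :: rest =>
    if acc.contains (String.ofList [symbol]) then acc  -- raise ValueError (outside Pre_)
    else
      -- result[symbol] = t_to[i] ; index is in range under Pre_
      cttLoopA tt rest
        (acc.insert (String.ofList [symbol]) (String.ofList [(PySem.Str.pyGet? tt i).getD ' ']))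

def create_translation_table (t_from : String) (t_to : String) : List (String × String) :=
  if PySem.Str.len t_from ≠ PySem.Str.len t_to then []  -- raise ValueError (outside Pre_)
  else (cttLoopA t_to (PySem.List.enumerate t_from.toList 0) PySem.Dict.empty).items

-- ===== PORT B =====
def create_translation_table_alt (t_from : String) (t_to : String) : List (String × String) :=
  if PySem.Str.len t_from ≠ PySem.Str.len t_to then []  -- raise ValueError (outside Pre_)
  else
    -- keys = sorted(t_from); adjacent-pair scan 'for a, b in zip(keys, keys[1:])'
    if ((PySem.List.sorted t_from.toList (fun c => c.toNat) false).zip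
        ((PySem.List.sorted t_from.toList (fun c => c.toNat) false).drop 1)).any
        (fun p => p.1 == p.2) then []  -- raise ValueError (outside Pre_)
    else
      -- {k: v for k, v in zip(t_from, t_to)}
      (PySem.Dict.ofList ((t_from.toList.zip t_to.toList).map
        (fun p => (String.ofList [p.1], String.ofList [p.2])))).items

-- ===== PRECONDITION & SPEC =====
-- Pre_ = exactly the inputs where the Python A returns: same lengths and no repeated
-- symbol in t_from (otherwise A raises ValueError).
def Pre_create_translation_table (t_from : String) (t_to : String) : Prop :=
  t_from.toList.length = t_to.toList.length ∧ t_from.toList.Nodup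
instance (t_from : String) (t_to : String) : Decidable (Pre_create_translation_table t_from t_to) := by
  unfold Pre_create_translation_table; infer_instance

def pvWitness_create_translation_table : String × String := ("abc", "xyz")

def Spec_create_translation_table (t_from : String) (t_to : String) (out : List (String × String)) : Prop := out = create_translation_table_alt t_from t_to
instance (t_from : String) (t_to : String) (out : List (String × String)) : Decidable (Spec_create_translation_table t_from t_to out) := by unfold Spec_create_translation_table; infer_instance

-- ===== CLAIM (what is proved, stated in full; the proofs are below) =====
def Claim_equal_create_translation_table : Prop := ∀ (t_from : String) (t_to : String), Dom_create_translation_table t_from t_to → Pre_create_translation_table t_from t_to → Spec_create_translation_table t_from t_to (create_translation_table t_from t_to)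

-- ===== LEMMAS AND PROOFS =====

theorem mkc_inj {a b : Char} (h : String.ofList [a] = String.ofList [b]) : a = b := by
  have h2 := congrArg String.toList h
  simp only [String.toList_ofList, List.cons.injEq, and_true] at h2
  exact h2

-- a Nodup list has no equal adjacent pair
theorem nodup_adj_any_false (l : List Char) (h : l.Nodup) :
    (l.zip (l.drop 1)).any (fun p => p.1 == p.2) = false := by
  induction l with
  | nil => rfl
  | cons x rest ih =>
    cases rest with
    | nil => rfl
    | cons y rs =>
      have hnd := List.nodup_cons.mp h
      have hxy : x ≠ y := fun he => hnd.1 (he ▸ List.mem_cons_self)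
      simp only [List.drop_succ_cons, List.drop_zero, List.zip_cons_cons, List.any_cons,
        Bool.or_eq_false_iff, beq_eq_false_iff_ne, ne_eq]
      exact ⟨hxy, by simpa using ih hnd.2⟩

-- folding insert over pairs with fresh, pairwise-distinct keys just appends them.
theorem items_foldl_insert (ps : List (String × String)) (d : PySem.Dict String String)
    (hfresh : ∀ p ∈ ps, d.contains p.1 = false) (hnd : (ps.map Prod.fst).Nodup) :
    (ps.foldl (fun d p => d.insert p.1 p.2) d).items = d.items ++ ps := by
  induction ps generalizing d with
  | nil => simp
  | cons p rest ih =>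
    simp only [List.foldl_cons]
    have hp : d.contains p.1 = false := hfresh p (by simp)
    rw [ih (d.insert p.1 p.2)]
    · rw [PySem.Dict.items_insert_of_not_contains _ _ (by simp [hp])]
      simp
    · intro q hq
      have hne : q.1 ≠ p.1 := by
        simp only [List.map_cons, List.nodup_cons] at hnd
        intro he
        exact hnd.1 (he ▸ (List.mem_map.mpr ⟨q, hq, rfl⟩))
      rw [PySem.Dict.contains_insert]
      simp [hne, hfresh q (by simp [hq])]
    · simp only [List.map_cons, List.nodup_cons] at hnd
      exact hnd.2

-- A's loop over 'enumerate t_from' starting at position k equals a fold of inserts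
-- over the zip of the remaining symbols with the corresponding tail of t_to.
theorem loopA_eq_foldl (tt : String) (xs : List Char) (k : Nat) (acc : PySem.Dict String String)
    (hlen : k + xs.length ≤ tt.toList.length)
    (hfresh : ∀ c ∈ xs, acc.contains (String.ofList [c]) = false)
    (hnd : xs.Nodup) :
    cttLoopA tt (PySem.List.enumerate xs (k : Int)) acc =
      ((xs.zip (tt.toList.drop k)).map (fun p => (String.ofList [p.1], String.ofList [p.2]))).foldl
        (fun d p => d.insert p.1 p.2) acc := by
  induction xs generalizing k acc with
  | nil => simp [PySem.List.enumerate, cttLoopA]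
  | cons x rest ih =>
    rw [PySem.List.enumerate_cons]
    simp only [cttLoopA]
    rw [hfresh x (by simp)]
    simp only [if_neg Bool.false_ne_true]
    have hk : k < tt.toList.length := by simp only [List.length_cons] at hlen; omega
    have hget : PySem.Str.pyGet? tt (k : Int) = some tt.toList[k] := by
      simp [List.getElem?_eq_getElem hk]
    have hdrop : tt.toList.drop k = tt.toList[k] :: tt.toList.drop (k + 1) :=
      (List.drop_eq_getElem_cons hk)
    rw [hdrop]
    simp only [List.zip_cons_cons, List.map_cons, List.foldl_cons, hget, Option.getD_some]
    have : ((k : Int) + 1) = ((k + 1 : Nat) : Int) := by push_cast; ring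
    have h1 : k + 1 + rest.length ≤ tt.toList.length := by
      simp only [List.length_cons] at hlen; omega
    have h2 : ∀ c ∈ rest,
        (acc.insert (String.ofList [x]) (String.ofList [tt.toList[k]])).contains
          (String.ofList [c]) = false := by
      intro c hc
      rw [PySem.Dict.contains_insert]
      have hne : String.ofList [c] ≠ String.ofList [x] := by
        intro he
        exact (List.nodup_cons.mp hnd).1 (mkc_inj he ▸ hc)
      simp [hne, hfresh c (by simp [hc])]
    rw [this, ih (k + 1) _ h1 h2 (List.nodup_cons.mp hnd).2]

theorem map_fst_pairs (xs ys : List Char) :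
    ((xs.zip ys).map (fun p => (String.ofList [p.1], String.ofList [p.2]))).map Prod.fst
      = ((xs.zip ys).map Prod.fst).map (fun c => String.ofList [c]) := by
  simp [List.map_map]

theorem pairs_fst_nodup (xs ys : List Char) (hle : xs.length ≤ ys.length) (hnd : xs.Nodup) :
    (((xs.zip ys).map (fun p => (String.ofList [p.1], String.ofList [p.2]))).map Prod.fst).Nodup := by
  rw [map_fst_pairs, List.map_fst_zip hle]
  exact List.Nodup.map (fun a b h => mkc_inj h) hnd

-- ===== VERDICT (by name: the statement is the Claim_ definition above) =====
theorem create_translation_table_spec : Claim_equal_create_translation_table := by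
  intro t_from t_to _ hpre
  obtain ⟨hlen, hnd⟩ := hpre
  unfold Spec_create_translation_table create_translation_table create_translation_table_alt
  have hlenS : t_from.length = t_to.length := by simpa using hlen
  rw [if_neg (by simp [hlenS]), if_neg (by simp [hlenS])]
  -- B's sorted adjacent-pair scan finds no duplicate, since sorted t_from is Nodup
  have hkeysnd : (PySem.List.sorted t_from.toList (fun c => c.toNat) false).Nodup :=
    (PySem.List.sorted_perm t_from.toList (fun c => c.toNat) false).nodup_iff.mpr hnd
  have hB := nodup_adj_any_false _ hkeysnd
  rw [if_neg (by rw [hB]; exact Bool.false_ne_true)]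
  set pairs := (t_from.toList.zip t_to.toList).map
      (fun p => (String.ofList [p.1], String.ofList [p.2])) with hpairs
  have hndp : (pairs.map Prod.fst).Nodup :=
    pairs_fst_nodup _ _ (le_of_eq hlen) hnd
  have hitems : (pairs.foldl (fun d p => d.insert p.1 p.2)
      (PySem.Dict.empty : PySem.Dict String String)).items = pairs := by
    rw [items_foldl_insert pairs PySem.Dict.empty (fun p _ => by simp) hndp]
    rfl
  -- A side
  have hA := loopA_eq_foldl t_to t_from.toList 0 PySem.Dict.empty
      (by omega) (fun c _ => by simp) hnd
  norm_num at hA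
  rw [hA, hitems]
  -- B side
  have hofl : PySem.Dict.ofList pairs
      = pairs.foldl (fun d p => d.insert p.1 p.2) PySem.Dict.empty := rfl
  rw [hofl, hitems]
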